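-- pv_equiv track=rewrite | github.com/dbsgh3344/algorithm | programmers/level2/Billiards.py | solution
-- ===== SOURCE A (Python) =====
-- def solution(m, n, startX, startY, balls) :
--     anslist = []
--     for i in balls :
--         ex,ey = i
--         sx,sy = startX,startY
--
--         if sy == ey :
--             # sd1 = calc_distance_eq_y(n,sx,sy,ex)
--             # sd2 = calc_distance_eq_y(0,sx,sy,ex)
--             sd1 = (sx - ex)**2 + ((n - sy)*2)**2
--             sd2 = (sx - ex)**2 + ((sy)*2)**2
--             sd3 = ((0- sx) + (0 - ex))**2 if sx < ex else ((m - sx) + (m - ex))**2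
--             ans = min(sd1,sd2,sd3)
--
--         elif sx == ex :
--             # sd1 = calc_distance_eq_x(0,sx,sy,ey)
--             # sd2 = calc_distance_eq_x(m,sx,sy,ey)
--             sd1 = (sx*2)**2 + (sy-ey)**2
--             sd2 = ((m-sx)*2)**2 + (sy-ey)**2
--             sd3 = ((0 - sy) + (0 - ey))**2 if sy < ey else ((n - sy) + (n - ey))**2
--             ans = min(sd1,sd2,sd3)
--
--         else :
--             sd1 = (sx-ex)**2 + ((n - sy) + (n - ey))**2
--             sd2 = ((m - sx) + (m - ex))**2 + (sy - ey)**2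
--             sd3 = (sx-ex)**2 + (sy + ey)**2
--             sd4 = (sx + ex)**2 + (sy - ey)**2
--             ans = min(sd1,sd2,sd3,sd4)
--
--         anslist.append(ans)
--
--     return anslist
-- ===== SOURCE B (Python) =====
-- def solution(m, n, startX, startY, balls):
--     sx, sy = startX, startY
--     # the cue ball's mirror image across each wall, paired with a predicate saying
--     # whether a given target blocks the straight shot toward that wall
--     shots = [
--         ((sx, -sy),       lambda ex, ey: ex == sx and ey != sy and ey < sy),   # bottom wall
--         ((sx, 2 * n - sy), lambda ex, ey: ex == sx and ey != sy and sy < ey),  # top wall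
--         ((-sx, sy),       lambda ex, ey: ey == sy and ex <= sx),               # left wall
--         ((2 * m - sx, sy), lambda ex, ey: ey == sy and sx < ex),               # right wall
--     ]
--     res = []
--     for ex, ey in balls:
--         best = None
--         for (px, py), blocked in shots:
--             if blocked(ex, ey):
--                 continue
--             d = (px - ex) ** 2 + (py - ey) ** 2
--             if best is None or d < best:
--                 best = d
--         res.append(best)
--     return res
-- ===== Notes on version B (the rewrite author's own statement) =====
-- stated objective: alternative
-- what changed: A picks, in a three-way coordinate branch, a hand-written subset of reflection-distance formulas per case; B is organised geometrically: it mirrors the cue ball across each of the four walls once, pairs each mirror with a blocking predicate (the target lies on the straight shot to that wall), and for each target runs one filter-and-min fold over the mirrors with no coordinate branching.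
import Mathlib
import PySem

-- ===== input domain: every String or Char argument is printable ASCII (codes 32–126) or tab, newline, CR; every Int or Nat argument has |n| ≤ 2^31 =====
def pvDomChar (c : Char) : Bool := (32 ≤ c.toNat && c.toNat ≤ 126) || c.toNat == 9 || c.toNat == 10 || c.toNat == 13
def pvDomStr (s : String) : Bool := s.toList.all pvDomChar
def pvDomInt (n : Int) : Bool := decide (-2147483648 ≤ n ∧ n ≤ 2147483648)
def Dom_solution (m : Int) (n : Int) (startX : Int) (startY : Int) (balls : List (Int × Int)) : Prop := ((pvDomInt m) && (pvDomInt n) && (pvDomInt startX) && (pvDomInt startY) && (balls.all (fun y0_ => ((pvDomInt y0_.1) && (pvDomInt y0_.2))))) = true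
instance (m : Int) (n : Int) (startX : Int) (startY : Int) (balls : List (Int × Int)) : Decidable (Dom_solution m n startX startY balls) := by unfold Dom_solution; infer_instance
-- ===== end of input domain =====

-- B replaces A's three-way coordinate branch (each with hand-picked formulas) by a
-- geometric decomposition: mirror the cue ball across each wall, filter mirrors whose
-- straight shot the target blocks, and take the min distance in one fold; objective:
-- alternative decomposition, same cost.

-- ===== PORT A =====
-- the body of A's loop for one ball i
def ansA (m : Int) (n : Int) (startX : Int) (startY : Int) (i : Int × Int) : Int :=
  let ex := i.1
  let ey := i.2
  let sx := startX
  let sy := startY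
  if sy == ey then
    let sd1 := (sx - ex)^2 + ((n - sy)*2)^2
    let sd2 := (sx - ex)^2 + (sy*2)^2
    let sd3 := if sx < ex then ((0 - sx) + (0 - ex))^2 else ((m - sx) + (m - ex))^2
    min sd1 (min sd2 sd3)
  else if sx == ex then
    let sd1 := (sx*2)^2 + (sy - ey)^2
    let sd2 := ((m - sx)*2)^2 + (sy - ey)^2
    let sd3 := if sy < ey then ((0 - sy) + (0 - ey))^2 else ((n - sy) + (n - ey))^2
    min sd1 (min sd2 sd3)
  else
    let sd1 := (sx - ex)^2 + ((n - sy) + (n - ey))^2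
    let sd2 := ((m - sx) + (m - ex))^2 + (sy - ey)^2
    let sd3 := (sx - ex)^2 + (sy + ey)^2
    let sd4 := (sx + ex)^2 + (sy - ey)^2
    min sd1 (min sd2 (min sd3 sd4))

def solution (m : Int) (n : Int) (startX : Int) (startY : Int) (balls : List (Int × Int)) : List Int :=
  balls.foldl (fun anslist i => anslist ++ [ansA m n startX startY i]) []

-- ===== PORT B =====
-- the cue ball's mirror image across each wall, paired with a predicate saying
-- whether a given target blocks the straight shot toward that wall
def shotsB (m : Int) (n : Int) (sx : Int) (sy : Int) :
    List ((Int × Int) × (Int → Int → Bool)) :=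
  [ ((sx, -sy),        fun ex ey => ex == sx && ey != sy && decide (ey < sy)),
    ((sx, 2*n - sy),   fun ex ey => ex == sx && ey != sy && decide (sy < ey)),
    ((-sx, sy),        fun ex ey => ey == sy && decide (ex ≤ sx)),
    ((2*m - sx, sy),   fun ex ey => ey == sy && decide (sx < ex)) ]

-- B's inner loop for one target (ex, ey): filter-and-min over the mirrors
def ansB (m : Int) (n : Int) (startX : Int) (startY : Int) (i : Int × Int) : Int :=
  let ex := i.1
  let ey := i.2
  let best :=
    (shotsB m n startX startY).foldl
      (fun best pb =>
        if pb.2 ex ey then best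
        else
          let d := (pb.1.1 - ex)^2 + (pb.1.2 - ey)^2
          match best with
          | none => some d
          | some b => if d < b then some d else some b)
      none
  match best with
  | some v => v
  | none => 0    -- unreachable: at most one mirror is blocked

def solution_alt (m : Int) (n : Int) (startX : Int) (startY : Int) (balls : List (Int × Int)) : List Int :=
  balls.foldl (fun res i => res ++ [ansB m n startX startY i]) []

-- ===== PRECONDITION & SPEC =====
def Spec_solution (m : Int) (n : Int) (startX : Int) (startY : Int) (balls : List (Int × Int)) (out : List Int) : Prop := out = solution_alt m n startX startY balls
instance (m : Int) (n : Int) (startX : Int) (startY : Int) (balls : List (Int × Int)) (out : List Int) : Decidable (Spec_solution m n startX startY balls out) := by unfold Spec_solution; infer_instance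

-- ===== CLAIM =====
def Claim_equal_solution : Prop := ∀ (m : Int) (n : Int) (startX : Int) (startY : Int) (balls : List (Int × Int)), Dom_solution m n startX startY balls → Spec_solution m n startX startY balls (solution m n startX startY balls)

-- ===== LEMMAS AND PROOFS =====

lemma foldl_append_one {α β : Type} (f : α → β) (l : List α) (acc : List β) :
    l.foldl (fun a x => a ++ [f x]) acc = acc ++ l.map f := by
  induction l generalizing acc with
  | nil => simp
  | cons h t ih => simp [List.foldl_cons, ih]

lemma ans_eq (m n sx sy : Int) (i : Int × Int) : ansA m n sx sy i = ansB m n sx sy i := by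
  obtain ⟨ex, ey⟩ := i
  simp only [ansA, ansB, shotsB, List.foldl_cons, List.foldl_nil]
  by_cases hy : sy = ey
  · subst hy
    by_cases hx : sx < ex
    · simp [hx]
      rw [show ((2*n:Int) - sy - sy)^2 = ((n - sy)*2)^2 from by ring,
          show ((-sy:Int) - sy)^2 = (sy*2)^2 from by ring,
          show ((-sx:Int) + -ex)^2 = (-sx - ex)^2 from by ring]
      generalize (sx - ex)^2 = p
      generalize (((n:Int) - sy)*2)^2 = q
      generalize ((sy:Int)*2)^2 = r
      generalize ((-sx:Int) - ex)^2 = s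
      split_ifs <;> simp <;> first
        | omega
        | (split_ifs <;> simp <;> omega)
    · simp [hx]
      rw [show ((2*n:Int) - sy - sy)^2 = ((n - sy)*2)^2 from by ring,
          show ((-sy:Int) - sy)^2 = (sy*2)^2 from by ring,
          show ((2*m:Int) - sx - ex)^2 = (m - sx + (m - ex))^2 from by ring]
      generalize (sx - ex)^2 = p
      generalize (((n:Int) - sy)*2)^2 = q
      generalize ((sy:Int)*2)^2 = r
      generalize ((m:Int) - sx + (m - ex))^2 = s
      split_ifs <;> simp <;> first
        | omega
        | (split_ifs <;> simp <;> omega)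
  · by_cases hx : sx = ex
    · subst hx
      simp [hy, Ne.symm hy]
      rw [show ((-sy:Int) + -ey)^2 = (-sy - ey)^2 from by ring,
          show ((n:Int) - sy + (n - ey))^2 = (2*n - sy - ey)^2 from by ring,
          show ((sx:Int)*2)^2 = (-sx - sx)^2 from by ring,
          show (((m:Int) - sx)*2)^2 = (2*m - sx - sx)^2 from by ring]
      generalize (sy - ey)^2 = p
      generalize ((-sy:Int) - ey)^2 = q
      generalize ((2*n:Int) - sy - ey)^2 = r
      generalize ((-sx:Int) - sx)^2 = s
      generalize ((2*m:Int) - sx - sx)^2 = t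
      split_ifs <;> simp <;> first
        | omega
        | (split_ifs <;> simp <;> omega)
        | (split_ifs <;> simp <;> split_ifs <;> simp <;> omega)
    · have he : ¬(ey = sy) := fun h => hy h.symm
      have hex : ¬(ex = sx) := fun h => hx h.symm
      simp [hy, hx, he, hex]
      rw [show ((sy:Int) + ey)^2 = (-sy - ey)^2 from by ring,
          show ((n:Int) - sy + (n - ey))^2 = (2*n - sy - ey)^2 from by ring,
          show ((sx:Int) + ex)^2 = (-sx - ex)^2 from by ring,
          show ((m:Int) - sx + (m - ex))^2 = (2*m - sx - ex)^2 from by ring]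
      generalize (sx - ex)^2 = p
      generalize (sy - ey)^2 = q
      generalize ((-sy:Int) - ey)^2 = r
      generalize ((2*n:Int) - sy - ey)^2 = t
      generalize ((-sx:Int) - ex)^2 = u
      generalize ((2*m:Int) - sx - ex)^2 = v
      split_ifs <;> simp <;> first
        | omega
        | (split_ifs <;> simp <;> omega)
        | (split_ifs <;> simp <;> split_ifs <;> simp <;> omega)

theorem solution_spec : Claim_equal_solution := by
  intro m n sx sy balls _
  unfold Spec_solution solution solution_alt
  rw [foldl_append_one, foldl_append_one, List.nil_append, List.nil_append]
  exact List.map_congr_left (fun i _ => ans_eq m n sx sy i)
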